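-- pv_equiv track=rewrite | github.com/Atumyugi/RSIP | yoyiUtils/yoyiDataSet.py | ComputeBlockByGeneratePairData
-- ===== SOURCE A (Python) =====
-- def ComputeBlockByGeneratePairData(H, W, block_size, overlap_size):
--     subIm_index = []
--     for r in range(0, H - block_size, overlap_size):
--         for c in range(0, W - block_size, block_size):
--             subIm_index.append([r, r + block_size, c, c + block_size])
--         subIm_index.append([r, r + block_size, W - block_size, W])  # 右侧边界
--     for c in range(0, W - block_size, block_size):  # 下侧边界
--         subIm_index.append([H - block_size, H, c, c + block_size])
--     subIm_index.append([H - block_size, H, W - block_size, W])  # 右下角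
--     return subIm_index
-- ===== SOURCE B (Python) =====
-- def ComputeBlockByGeneratePairData(H, W, block_size, overlap_size):
--     # number of block starts along one axis: interior starts ceil(limit/step) (floored at 0) plus the boundary start
--     def n_starts(limit, step):
--         return max(0, -(-limit // step)) + 1
--
--     nr = n_starts(H - block_size, overlap_size)
--     nc = n_starts(W - block_size, block_size)
--     out = []
--     for k in range(nr * nc):
--         i, j = divmod(k, nc)
--         rs = i * overlap_size if i < nr - 1 else H - block_size
--         cs = j * block_size if j < nc - 1 else W - block_size
--         out.append([rs, rs + block_size, cs, cs + block_size])
--     return out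
-- ===== Notes on version B (the rewrite author's own statement) =====
-- stated objective: alternative
-- what changed: Replaced A's four special-cased nested append loops (interior grid, right edge, bottom edge, corner) by a single flat loop over range(nr*nc) that recovers each block's row/column start arithmetically via divmod, with the grid dimensions nr, nc computed by closed-form ceiling division.
import Mathlib
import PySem

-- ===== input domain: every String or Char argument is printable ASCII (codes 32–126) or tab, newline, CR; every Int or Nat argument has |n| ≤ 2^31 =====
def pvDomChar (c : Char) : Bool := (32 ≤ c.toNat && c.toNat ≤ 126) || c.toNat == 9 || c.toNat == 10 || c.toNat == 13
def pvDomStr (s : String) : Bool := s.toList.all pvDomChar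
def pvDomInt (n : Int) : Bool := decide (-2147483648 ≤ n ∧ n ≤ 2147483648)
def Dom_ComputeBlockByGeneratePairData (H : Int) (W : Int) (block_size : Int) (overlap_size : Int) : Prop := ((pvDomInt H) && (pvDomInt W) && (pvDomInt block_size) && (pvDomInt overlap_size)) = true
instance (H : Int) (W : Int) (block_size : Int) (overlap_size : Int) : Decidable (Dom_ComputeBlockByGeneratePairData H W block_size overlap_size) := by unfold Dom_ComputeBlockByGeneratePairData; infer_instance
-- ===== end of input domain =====

-- B replaces A's four special-cased nested append loops by a single flat loop over
-- range(nr*nc) that recovers each block's row/column start arithmetically with divmod,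
-- with the grid dimensions obtained by closed-form ceiling division (objective: alternative).

-- ===== PORT A =====
def ComputeBlockByGeneratePairData (H : Int) (W : Int) (block_size : Int) (overlap_size : Int) : List (List Int) :=
  let subIm_index : List (List Int) := []
  let subIm_index :=
    (PySem.List.pyRange 0 (H - block_size) overlap_size).foldl (fun acc r =>
      ((PySem.List.pyRange 0 (W - block_size) block_size).foldl (fun acc2 c =>
        acc2 ++ [[r, r + block_size, c, c + block_size]]) acc)
      ++ [[r, r + block_size, W - block_size, W]]) subIm_index
  let subIm_index :=
    (PySem.List.pyRange 0 (W - block_size) block_size).foldl (fun acc c =>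
      acc ++ [[H - block_size, H, c, c + block_size]]) subIm_index
  subIm_index ++ [[H - block_size, H, W - block_size, W]]

-- ===== PORT B =====
-- helper n_starts of Source B: max(0, -(-limit // step)) + 1
def pvNStarts (limit : Int) (step : Int) : Int :=
  max 0 (-(PySem.Int.floordiv (-limit) step)) + 1

def ComputeBlockByGeneratePairData_alt (H : Int) (W : Int) (block_size : Int) (overlap_size : Int) : List (List Int) :=
  let nr := pvNStarts (H - block_size) overlap_size
  let nc := pvNStarts (W - block_size) block_size
  (PySem.List.pyRange 0 (nr * nc) 1).foldl (fun out k =>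
    let i := PySem.Int.floordiv k nc
    let j := PySem.Int.mod k nc
    let rs := if i < nr - 1 then i * overlap_size else H - block_size
    let cs := if j < nc - 1 then j * block_size else W - block_size
    out ++ [[rs, rs + block_size, cs, cs + block_size]]) []

-- ===== PRECONDITION & SPEC =====
-- Pre_ excludes exactly the inputs where Python A raises ValueError: range() with step 0
-- (overlap_size == 0 or block_size == 0); B raises ZeroDivisionError there too.
def Pre_ComputeBlockByGeneratePairData (H : Int) (W : Int) (block_size : Int) (overlap_size : Int) : Prop :=
  block_size ≠ 0 ∧ overlap_size ≠ 0
instance (H : Int) (W : Int) (block_size : Int) (overlap_size : Int) : Decidable (Pre_ComputeBlockByGeneratePairData H W block_size overlap_size) := by unfold Pre_ComputeBlockByGeneratePairData; infer_instance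

def pvWitness_ComputeBlockByGeneratePairData : Int × Int × Int × Int := (10, 7, 3, 2)

def Spec_ComputeBlockByGeneratePairData (H : Int) (W : Int) (block_size : Int) (overlap_size : Int) (out : List (List Int)) : Prop := out = ComputeBlockByGeneratePairData_alt H W block_size overlap_size
instance (H : Int) (W : Int) (block_size : Int) (overlap_size : Int) (out : List (List Int)) : Decidable (Spec_ComputeBlockByGeneratePairData H W block_size overlap_size out) := by unfold Spec_ComputeBlockByGeneratePairData; infer_instance

-- ===== CLAIM (what is proved, stated in full; the proofs are below) =====
def Claim_equal_ComputeBlockByGeneratePairData : Prop := ∀ (H : Int) (W : Int) (block_size : Int) (overlap_size : Int), Dom_ComputeBlockByGeneratePairData H W block_size overlap_size → Pre_ComputeBlockByGeneratePairData H W block_size overlap_size → Spec_ComputeBlockByGeneratePairData H W block_size overlap_size (ComputeBlockByGeneratePairData H W block_size overlap_size)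

-- ===== LEMMAS AND PROOFS =====

-- ceiling division: -((-L) // s) = (L + s - 1) // s for 0 < s (Euclidean = floor here)
theorem pvCeilAux (L s : Int) (hs : 0 < s) : -((-L)/s) = (L + s - 1)/s := by
  have hs0 : s ≠ 0 := by omega
  rcases em (s ∣ L) with h | h
  · obtain ⟨c, rfl⟩ := h
    have e1 : -(s * c) = s * (-c) := by ring
    have e2 : s * c + s - 1 = (s - 1) + c * s := by ring
    rw [e1, Int.mul_ediv_cancel_left _ hs0, e2, Int.add_mul_ediv_right _ _ hs0,
        Int.ediv_eq_zero_of_lt (by omega) (by omega)]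
    ring
  · have hmod : L % s ≠ 0 := fun hc => h (Int.dvd_of_emod_eq_zero hc)
    have hb1 : 0 ≤ L % s := Int.emod_nonneg _ hs0
    have hb2 : L % s < s := Int.emod_lt_of_pos _ hs
    have hL : s * (L / s) + L % s = L := Int.ediv_add_emod L s
    have hL2 : L / s * s = s * (L / s) := by ring
    have lhs : (-L)/s = -(L/s) - 1 := by
      rw [Int.neg_ediv, if_neg h, Int.sign_eq_one_of_pos hs]
    have e1 : L + s - 1 = (L % s - 1 + 1 * s) + (L / s) * s := by omega
    rw [lhs, e1, Int.add_mul_ediv_right _ _ hs0, Int.add_mul_ediv_right _ _ hs0]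
    rw [Int.ediv_eq_zero_of_lt (show (0:Int) ≤ L % s - 1 by omega) (by omega)]
    ring

-- range(0, L, s) is the first (pvNStarts L s - 1) multiples of s
theorem pvPyRangeZeroEq (L s : Int) (hs : s ≠ 0) :
    PySem.List.pyRange 0 L s
      = (List.range (max 0 (-(PySem.Int.floordiv (-L) s))).toNat).map (fun k : Nat => s * (k:Int)) := by
  have hcnt : (if 0 < s then if 0 < L then ((L - 0 + s - 1) / s).toNat else 0
      else if L < 0 then ((0 - L + -s - 1) / -s).toNat else 0)
      = (max 0 (-(PySem.Int.floordiv (-L) s))).toNat := by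
    rcases lt_or_gt_of_ne hs with hneg | hpos
    · rw [if_neg (by omega : ¬ (0:Int) < s)]
      have h1 : PySem.Int.floordiv (-L) s = PySem.Int.floordiv L (-s) := by
        have := PySem.Int.floordiv_neg_neg L (-s)
        simpa using this
      have hpos' : (0:Int) < -s := by omega
      rw [h1, PySem.Int.floordiv_eq_ediv_of_pos hpos']
      have hceil := pvCeilAux (-L) (-s) hpos'
      simp only [neg_neg] at hceil
      rw [hceil]
      have e : 0 - L + -s - 1 = -L + -s - 1 := by ring
      rw [e]
      split_ifs with h
      · have : (0:Int) ≤ (-L + -s - 1) / (-s) := Int.ediv_nonneg (by omega) (by omega)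
        omega
      · have : (-L + -s - 1) / (-s) < 1 := by
          rw [Int.ediv_lt_iff_lt_mul hpos']
          omega
        omega
    · rw [if_pos hpos, PySem.Int.floordiv_eq_ediv_of_pos hpos, pvCeilAux L s hpos]
      have e : L - 0 + s - 1 = L + s - 1 := by ring
      rw [e]
      split_ifs with h
      · have : (0:Int) ≤ (L + s - 1) / s := Int.ediv_nonneg (by omega) (by omega)
        omega
      · have : (L + s - 1) / s < 1 := by
          rw [Int.ediv_lt_iff_lt_mul hpos]
          omega
        omega
  unfold PySem.List.pyRange
  rw [if_neg hs]
  simp only [zero_add]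
  rw [hcnt]

theorem pvMapRangeGetD {α : Type} (xs : List α) (d : α) :
    (List.range xs.length).map (fun k => xs.getD k d) = xs := by
  apply List.ext_getElem
  · simp
  · intro i h1 h2
    simp [List.getD_eq_getElem?_getD, h2]

-- flat divmod enumeration of a grid = row-major flatMap
theorem pvGridEnum {α : Type} (C : List Int) (f : Int → Int → α) (hC : 0 < C.length) :
    ∀ (R : List Int),
      (List.range (R.length * C.length)).map
        (fun k => f (R.getD (k / C.length) 0) (C.getD (k % C.length) 0))
      = R.flatMap (fun r => C.map (f r)) := by
  intro R
  induction R with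
  | nil => simp
  | cons r R ih =>
    have hlen : (r :: R).length * C.length = C.length + R.length * C.length := by
      simp [List.length_cons]; ring
    rw [hlen, List.range_add, List.map_append, List.map_map]
    congr 1
    · have h1 : ∀ k ∈ List.range C.length,
          f ((r :: R).getD (k / C.length) 0) (C.getD (k % C.length) 0) = f r (C.getD k 0) := by
        intro k hk
        rw [List.mem_range] at hk
        rw [Nat.div_eq_of_lt hk, Nat.mod_eq_of_lt hk]
        rfl
      rw [List.map_congr_left h1]
      calc (List.range C.length).map (fun k => f r (C.getD k 0))
          = ((List.range C.length).map (fun k => C.getD k 0)).map (f r) := by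
            rw [List.map_map]; rfl
        _ = C.map (f r) := by rw [pvMapRangeGetD]
    · have h2 : ∀ k ∈ List.range (R.length * C.length),
          ((fun k => f ((r :: R).getD (k / C.length) 0) (C.getD (k % C.length) 0)) ∘
            (fun x => C.length + x)) k
          = f (R.getD (k / C.length) 0) (C.getD (k % C.length) 0) := by
        intro k hk
        simp only [Function.comp]
        rw [Nat.add_div_left _ hC, Nat.add_mod_left]
        rfl
      rw [List.map_congr_left h2, ih]
      simp [List.flatMap_def]

theorem pvGetDStarts (c : Nat) (s last : Int) (i : Nat) (hi : i ≤ c) :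
    ((List.range c).map (fun t : Nat => s * (t:Int)) ++ [last]).getD i 0
      = if i < c then s * (i:Int) else last := by
  rcases lt_or_eq_of_le hi with h | h
  · rw [if_pos h, List.getD_append _ _ _ _ (by simpa using h)]
    simp [List.getD_eq_getElem?_getD, List.getElem?_map, List.getElem?_range h]
  · subst h
    rw [if_neg (lt_irrefl _)]
    rw [List.getD_eq_getElem?_getD, List.getElem?_append_right (by simp)]
    simp

theorem pvAFlatMap (H W bs ov : Int) :
    ComputeBlockByGeneratePairData H W bs ov
      = (PySem.List.pyRange 0 (H - bs) ov ++ [H - bs]).flatMap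
          (fun r => (PySem.List.pyRange 0 (W - bs) bs ++ [W - bs]).map
            (fun c => [r, r + bs, c, c + bs])) := by
  unfold ComputeBlockByGeneratePairData
  simp only [PySem.List.foldl_append_singleton_eq_map, List.append_assoc]
  rw [PySem.List.foldl_append_eq_flatMap
      (g := fun r => ((PySem.List.pyRange 0 (W - bs) bs).map
        (fun c => [r, r + bs, c, c + bs])) ++ [[r, r + bs, W - bs, W]])]
  simp only [List.flatMap_append, List.flatMap_singleton, List.map_append, List.map_singleton]
  have hW : W - bs + bs = W := by ring
  have hH : H - bs + bs = H := by ring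
  simp [hW, hH]

theorem pvAltFlatMap (H W bs ov : Int) (hbs : bs ≠ 0) (hov : ov ≠ 0) :
    ComputeBlockByGeneratePairData_alt H W bs ov
      = (PySem.List.pyRange 0 (H - bs) ov ++ [H - bs]).flatMap
          (fun r => (PySem.List.pyRange 0 (W - bs) bs ++ [W - bs]).map
            (fun c => [r, r + bs, c, c + bs])) := by
  simp only [ComputeBlockByGeneratePairData_alt, pvNStarts,
    PySem.List.foldl_append_singleton_eq_map, List.nil_append]
  rw [pvPyRangeZeroEq (H - bs) ov hov, pvPyRangeZeroEq (W - bs) bs hbs,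
    PySem.List.pyRange_one]
  set cr := max 0 (-PySem.Int.floordiv (-(H - bs)) ov) with hcrdef
  set cc := max 0 (-PySem.Int.floordiv (-(W - bs)) bs) with hccdef
  have hcr : 0 ≤ cr := le_max_left _ _
  have hcc : 0 ≤ cc := le_max_left _ _
  set R := (List.range cr.toNat).map (fun k : Nat => ov * (k:Int)) ++ [H - bs] with hRdef
  set C := (List.range cc.toNat).map (fun k : Nat => bs * (k:Int)) ++ [W - bs] with hCdef
  have hRlen : R.length = cr.toNat + 1 := by simp [hRdef]
  have hClen : C.length = cc.toNat + 1 := by simp [hCdef]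
  have hNN : ((cr + 1) * (cc + 1) - 0).toNat = R.length * C.length := by
    rw [hRlen, hClen]
    have e3 : (cr + 1) * (cc + 1) - 0 = (((cr.toNat + 1) * (cc.toNat + 1) : Nat) : Int) := by
      push_cast [Int.toNat_of_nonneg hcr, Int.toNat_of_nonneg hcc]
      ring
    rw [e3, Int.toNat_natCast]
  rw [hNN, List.map_map,
    ← pvGridEnum C (fun r c => [r, r + bs, c, c + bs]) (by rw [hClen]; omega) R]
  apply List.map_congr_left
  intro k hk
  rw [List.mem_range, hRlen, hClen] at hk
  simp only [Function.comp, zero_add, hClen]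
  have hNc : cc + 1 = ((cc.toNat + 1 : Nat) : Int) := by
    push_cast [Int.toNat_of_nonneg hcc]
    ring
  rw [hNc, PySem.Int.floordiv_natCast, PySem.Int.mod_natCast]
  have hkdiv : k / (cc.toNat + 1) ≤ cr.toNat := by
    have hlt : k / (cc.toNat + 1) < cr.toNat + 1 :=
      Nat.div_lt_of_lt_mul (Nat.mul_comm (cr.toNat + 1) (cc.toNat + 1) ▸ hk)
    omega
  have hkmod : k % (cc.toNat + 1) ≤ cc.toNat := by
    have := Nat.mod_lt k (show 0 < cc.toNat + 1 by omega)
    omega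
  rw [hRdef, hCdef, pvGetDStarts cr.toNat ov (H - bs) _ hkdiv,
    pvGetDStarts cc.toNat bs (W - bs) _ hkmod]
  have ecr : cr + 1 - 1 = ((cr.toNat : Nat) : Int) := by omega
  have ecc : ((cc.toNat + 1 : Nat) : Int) - 1 = ((cc.toNat : Nat) : Int) := by omega
  simp only [ecr, ecc, Nat.cast_lt]
  split_ifs <;> simp [Int.mul_comm]

-- ===== VERDICT (by name: the statement is the Claim_ definition above) =====
theorem ComputeBlockByGeneratePairData_spec : Claim_equal_ComputeBlockByGeneratePairData := by
  intro H W bs ov _ hpre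
  obtain ⟨hbs, hov⟩ := hpre
  unfold Spec_ComputeBlockByGeneratePairData
  rw [pvAFlatMap, pvAltFlatMap H W bs ov hbs hov]
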